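-- pv_equiv track=rewrite | github.com/UWNETLAB/Nate | nate/edgeburst/generate_offsets.py | cooc
-- ===== SOURCE A (Python) =====
-- from itertools import groupby, chain, combinations
-- from collections import defaultdict
--
-- def cooc(word_ints, timestamps, minimum_offsets):
--     """
--     This is a docstring.
--     """
--     offset_dict = defaultdict(list)
--
--     for text, timestamp in zip(word_ints, timestamps):
--         keys = list(combinations(text,2))
--         for key in keys:
--             offset_dict[key].append(timestamp)
--
--     offsets_pruned = {k: v for k, v in offset_dict.items() if len(v) >= minimum_offsets}
--
--     return offsets_pruned
-- ===== SOURCE B (Python) =====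
-- from itertools import combinations
-- from collections import defaultdict
--
-- def cooc(word_ints, timestamps, minimum_offsets):
--     # Two-pass count-then-collect: first count each co-occurring pair,
--     # then collect timestamps only for pairs that meet the threshold.
--     counts = defaultdict(int)
--     for text, _ in zip(word_ints, timestamps):
--         for pair in combinations(text, 2):
--             counts[pair] += 1
--     result = defaultdict(list)
--     for text, timestamp in zip(word_ints, timestamps):
--         for pair in combinations(text, 2):
--             if counts[pair] >= minimum_offsets:
--                 result[pair].append(timestamp)
--     return dict(result)
-- ===== Notes on version B (the rewrite author's own statement) =====
-- stated objective: alternative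
-- what changed: Replaces A's single pass that materializes a timestamp list for every pair and then prunes the dict by list length with a two-pass count-then-collect decomposition: a first pass counts each co-occurring pair, a second pass appends timestamps only for pairs meeting the threshold.
import Mathlib
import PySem

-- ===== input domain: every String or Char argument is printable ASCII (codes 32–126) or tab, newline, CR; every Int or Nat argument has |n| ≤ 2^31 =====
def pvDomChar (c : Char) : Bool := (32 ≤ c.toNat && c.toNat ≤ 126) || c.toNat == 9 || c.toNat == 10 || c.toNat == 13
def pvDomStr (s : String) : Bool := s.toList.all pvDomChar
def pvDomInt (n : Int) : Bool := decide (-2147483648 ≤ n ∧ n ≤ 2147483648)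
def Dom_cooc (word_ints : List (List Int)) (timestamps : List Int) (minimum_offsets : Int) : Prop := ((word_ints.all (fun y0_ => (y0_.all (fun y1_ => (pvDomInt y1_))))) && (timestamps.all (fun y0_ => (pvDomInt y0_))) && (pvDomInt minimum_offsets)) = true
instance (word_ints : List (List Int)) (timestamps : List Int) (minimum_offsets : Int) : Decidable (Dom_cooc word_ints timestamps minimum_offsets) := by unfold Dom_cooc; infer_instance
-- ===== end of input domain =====

-- B replaces A's build-all-timestamp-lists-then-prune dict with a two-pass count-then-collect
-- decomposition (same asymptotic cost; objective: alternative).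

-- shared helper: list(combinations(text, 2)) as pairs
-- (exact: every element of PySem.List.combinations text 2 has length 2, so getD reads the two components)
def pvPair2 (c : List Int) : Int × Int := (c.getD 0 0, c.getD 1 0)
def pvCombos (text : List Int) : List (Int × Int) := (PySem.List.combinations text 2).map pvPair2

-- ===== PORT A =====
def cooc (word_ints : List (List Int)) (timestamps : List Int) (minimum_offsets : Int) : List (Int × Int × List Int) :=
  -- offset_dict = defaultdict(list); for text, timestamp in zip(...): for key in combinations(text,2): offset_dict[key].append(timestamp)
  -- offsets_pruned = {k: v for k, v in offset_dict.items() if len(v) >= minimum_offsets}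
  (((word_ints.zip timestamps).foldl
      (fun d p => (pvCombos p.1).foldl (fun d key => d.modify key [] (fun v => v ++ [p.2])) d)
      PySem.Dict.empty).items.filter
    (fun kv => decide (minimum_offsets ≤ (kv.2.length : Int)))).map
    (fun kv => (kv.1.1, kv.1.2, kv.2))

-- ===== PORT B =====
-- first pass: counts = defaultdict(int); counts[pair] += 1
def pvCounts (word_ints : List (List Int)) (timestamps : List Int) : PySem.Dict (Int × Int) Int :=
  (word_ints.zip timestamps).foldl
    (fun d p => (pvCombos p.1).foldl (fun d key => d.modify key 0 (fun n => n + 1)) d)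
    PySem.Dict.empty

def cooc_alt (word_ints : List (List Int)) (timestamps : List Int) (minimum_offsets : Int) : List (Int × Int × List Int) :=
  -- second pass: result = defaultdict(list); if counts[pair] >= minimum_offsets: result[pair].append(timestamp)
  ((word_ints.zip timestamps).foldl
      (fun d p => (pvCombos p.1).foldl
        (fun d key => if minimum_offsets ≤ (pvCounts word_ints timestamps).getD key 0
                      then d.modify key [] (fun v => v ++ [p.2]) else d) d)
      PySem.Dict.empty).items.map
    (fun kv => (kv.1.1, kv.1.2, kv.2))

-- ===== PRECONDITION & SPEC =====
def Spec_cooc (word_ints : List (List Int)) (timestamps : List Int) (minimum_offsets : Int) (out : List (Int × Int × List Int)) : Prop := out = cooc_alt word_ints timestamps minimum_offsets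
instance (word_ints : List (List Int)) (timestamps : List Int) (minimum_offsets : Int) (out : List (Int × Int × List Int)) : Decidable (Spec_cooc word_ints timestamps minimum_offsets out) := by unfold Spec_cooc; infer_instance

-- ===== CLAIM (what is proved, stated in full; the proofs are below) =====
def Claim_equal_cooc : Prop := ∀ (word_ints : List (List Int)) (timestamps : List Int) (minimum_offsets : Int), Dom_cooc word_ints timestamps minimum_offsets → Spec_cooc word_ints timestamps minimum_offsets (cooc word_ints timestamps minimum_offsets)

-- ===== LEMMAS AND PROOFS =====

-- the flat event stream (pair, timestamp) both ports enumerate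
def pvEvents (word_ints : List (List Int)) (timestamps : List Int) : List ((Int × Int) × Int) :=
  (word_ints.zip timestamps).flatMap (fun p => (pvCombos p.1).map (fun k => (k, p.2)))

-- the threshold predicate on a pair: it occurs at least minimum_offsets times
def pvQ (word_ints : List (List Int)) (timestamps : List Int) (m : Int) : (Int × Int) → Bool :=
  fun k => decide (m ≤ ((((pvEvents word_ints timestamps).map (fun e => e.1)).count k : Int)))

-- the nested loop over zip/combinations is a fold over the flat event stream
theorem pv_nested_foldl {α : Type} (l : List (List Int × Int)) (g : α → ((Int × Int) × Int) → α) (a : α) :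
    l.foldl (fun d p => (pvCombos p.1).foldl (fun d k => g d (k, p.2)) d) a
      = (l.flatMap (fun p => (pvCombos p.1).map (fun k => (k, p.2)))).foldl g a := by
  induction l generalizing a with
  | nil => rfl
  | cons x xs ih => simp [List.flatMap_cons, List.foldl_append, List.foldl_map, ih]

theorem pv_filter_add {α : Type} [BEq α] [LawfulBEq α] (Q : α → Bool) (s : PySem.Set α) (x : α) :
    List.filter Q (PySem.Set.add s x)
      = if Q x then PySem.Set.add (List.filter Q s) x else List.filter Q s := by
  by_cases hx : x ∈ s
  · have h1 : PySem.Set.add s x = s := by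
      simp [PySem.Set.add, PySem.Set.contains, List.contains_eq_mem, hx]
    cases hq : Q x with
    | false => simp [h1]
    | true =>
      have h2 : PySem.Set.add (List.filter Q s) x = List.filter Q s := by
        simp [PySem.Set.add, PySem.Set.contains, List.contains_eq_mem, List.mem_filter, hx, hq]
      simp [h1, h2]
  · have h1 : PySem.Set.add s x = s ++ [x] := by
      simp [PySem.Set.add, PySem.Set.contains, List.contains_eq_mem, hx]
    have h2 : PySem.Set.add (List.filter Q s) x = List.filter Q s ++ [x] := by
      simp [PySem.Set.add, PySem.Set.contains, List.contains_eq_mem, List.mem_filter, hx]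
    cases hq : Q x with
    | false => simp [h1, List.filter_append, hq]
    | true => simp [h1, h2, List.filter_append, hq]

theorem pv_foldl_add_filter {α : Type} [BEq α] [LawfulBEq α] (Q : α → Bool) (xs : List α) (s : PySem.Set α) :
    List.filter Q (xs.foldl PySem.Set.add s) = (xs.filter Q).foldl PySem.Set.add (List.filter Q s) := by
  induction xs generalizing s with
  | nil => rfl
  | cons x xs ih =>
    cases hq : Q x with
    | false => simp [hq, ih, pv_filter_add, List.foldl_cons]
    | true => simp [hq, ih, pv_filter_add, List.foldl_cons]

theorem pv_ofList_filter {α : Type} [BEq α] [LawfulBEq α] (Q : α → Bool) (xs : List α) :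
    PySem.Set.ofList (xs.filter Q) = List.filter Q (PySem.Set.ofList xs) := by
  simpa [PySem.Set.ofList, PySem.Set.empty] using (pv_foldl_add_filter Q xs []).symm

-- characterisation of the append-building dict loop
theorem pv_items_buildAll (E : List ((Int × Int) × Int)) :
    ((E.foldl (fun d e => d.modify e.1 [] (fun v => v ++ [e.2])) PySem.Dict.empty).items)
      = (PySem.Set.ofList (E.map (fun e => e.1))).map
          (fun k => (k, (E.filter (fun p => p.1 == k)).map (fun e => e.2))) := by
  have hnd : ((E.foldl (fun d e => d.modify e.1 [] (fun v => v ++ [e.2])) PySem.Dict.empty).keys).Nodup :=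
    PySem.Dict.nodup_keys_foldl_modify_key E (fun e => e.1) [] (fun _ e => (fun v => v ++ [e.2])) PySem.Dict.empty (by simp)
  rw [PySem.Dict.items_eq_map_keys _ hnd []]
  rw [PySem.Dict.keys_foldl_modify_key E (fun e => e.1) [] (fun _ e => (fun v => v ++ [e.2])) PySem.Dict.empty]
  simp only [PySem.Dict.keys_empty, PySem.Set.update_nil_left]
  refine List.map_congr_left (fun k _ => ?_)
  rw [PySem.Dict.getD_foldl_modify_append E PySem.Dict.empty k]
  simp

-- A's result, characterised over the event stream
theorem pv_cooc_char (w : List (List Int)) (t : List Int) (m : Int) :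
    cooc w t m
      = ((PySem.Set.ofList ((pvEvents w t).map (fun e => e.1))).filter (pvQ w t m)).map
          (fun k => (k.1, k.2, ((pvEvents w t).filter (fun p => p.1 == k)).map (fun e => e.2))) := by
  unfold cooc
  have hb : (w.zip t).foldl
      (fun d p => (pvCombos p.1).foldl (fun d key => d.modify key [] (fun v => v ++ [p.2])) d)
      PySem.Dict.empty
      = (pvEvents w t).foldl (fun d e => d.modify e.1 [] (fun v => v ++ [e.2])) PySem.Dict.empty := by
    unfold pvEvents
    exact pv_nested_foldl (w.zip t) (fun d e => d.modify e.1 [] (fun v => v ++ [e.2])) PySem.Dict.empty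
  rw [hb, pv_items_buildAll, List.filter_map]
  have hfun : ((fun kv : (Int × Int) × List Int => decide (m ≤ (kv.2.length : Int))) ∘
      (fun k => (k, ((pvEvents w t).filter (fun p => p.1 == k)).map (fun e => e.2)))) = pvQ w t m := by
    funext k
    simp only [Function.comp, List.length_map, pvQ]
    rw [← List.countP_eq_length_filter, List.count_eq_countP, List.countP_map]
    rfl
  rw [hfun, List.map_map]
  rfl

-- B's counts dict holds exactly the multiplicity of each pair
theorem pv_counts_getD (w : List (List Int)) (t : List Int) (k : Int × Int) :
    (pvCounts w t).getD k 0 = ((((pvEvents w t).map (fun e => e.1)).count k : Int)) := by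
  have hb : pvCounts w t = (pvEvents w t).foldl (fun d e => d.modify e.1 0 (fun n => n + 1)) PySem.Dict.empty := by
    unfold pvCounts pvEvents
    exact pv_nested_foldl (w.zip t)
      (fun (d : PySem.Dict (Int × Int) Int) e => d.modify e.1 0 (fun n => n + 1)) PySem.Dict.empty
  have hm : (pvEvents w t).foldl
        (fun (d : PySem.Dict (Int × Int) Int) e => d.modify e.1 0 (fun n => n + 1)) PySem.Dict.empty
      = ((pvEvents w t).map (fun e => e.1)).foldl
        (fun (d : PySem.Dict (Int × Int) Int) x => d.modify x 0 (fun n => n + 1)) PySem.Dict.empty := by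
    rw [List.foldl_map]
  rw [hb, hm, PySem.Dict.getD_foldl_modify_add_one]
  simp

-- B's result, characterised over the filtered event stream
theorem pv_cooc_alt_char (w : List (List Int)) (t : List Int) (m : Int) :
    cooc_alt w t m
      = ((PySem.Set.ofList (((pvEvents w t).filter (fun e => pvQ w t m e.1)).map (fun e => e.1))).map
          (fun k => (k, (((pvEvents w t).filter (fun e => pvQ w t m e.1)).filter (fun p => p.1 == k)).map (fun e => e.2)))).map
          (fun kv => (kv.1.1, kv.1.2, kv.2)) := by
  unfold cooc_alt
  have hb : (w.zip t).foldl
      (fun d p => (pvCombos p.1).foldl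
        (fun d key => if m ≤ (pvCounts w t).getD key 0
                      then d.modify key [] (fun v => v ++ [p.2]) else d) d)
      PySem.Dict.empty
      = (pvEvents w t).foldl
          (fun d e => if m ≤ (pvCounts w t).getD e.1 0 then d.modify e.1 [] (fun v => v ++ [e.2]) else d)
          PySem.Dict.empty := by
    unfold pvEvents
    exact pv_nested_foldl (w.zip t)
      (fun d e => if m ≤ (pvCounts w t).getD e.1 0 then d.modify e.1 [] (fun v => v ++ [e.2]) else d)
      PySem.Dict.empty
  have hcond : (fun (d : PySem.Dict (Int × Int) (List Int)) (e : (Int × Int) × Int) =>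
        if m ≤ (pvCounts w t).getD e.1 0 then d.modify e.1 [] (fun v => v ++ [e.2]) else d)
      = (fun d e => if (fun e : (Int × Int) × Int => pvQ w t m e.1) e = true
                    then d.modify e.1 [] (fun v => v ++ [e.2]) else d) := by
    funext d e
    rw [pv_counts_getD w t e.1]
    by_cases h : m ≤ ((((pvEvents w t).map (fun e => e.1)).count e.1 : Int))
    · simp [pvQ, h]
    · simp [pvQ, h]
  rw [hb, hcond, ← List.foldl_filter, pv_items_buildAll]

theorem cooc_eq_cooc_alt (w : List (List Int)) (t : List Int) (m : Int) :
    cooc w t m = cooc_alt w t m := by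
  rw [pv_cooc_char, pv_cooc_alt_char]
  have hkeys : ((pvEvents w t).filter (fun e => pvQ w t m e.1)).map (fun e => e.1)
      = ((pvEvents w t).map (fun e => e.1)).filter (pvQ w t m) :=
    (List.filter_map (f := fun e : (Int × Int) × Int => e.1) (p := pvQ w t m) (l := pvEvents w t)).symm
  rw [hkeys, ← pv_ofList_filter, pv_ofList_filter, List.map_map]
  refine List.map_congr_left (fun k hk => ?_)
  have hQk : pvQ w t m k = true := (List.mem_filter.mp hk).2
  have hfilt : ((pvEvents w t).filter (fun e => pvQ w t m e.1)).filter (fun p => p.1 == k)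
      = (pvEvents w t).filter (fun p => p.1 == k) := by
    rw [List.filter_filter]
    refine List.filter_congr (fun e _ => ?_)
    cases he : (e.1 == k) with
    | false => simp
    | true =>
      have hek : e.1 = k := eq_of_beq he
      simp [hek, hQk]
  simp only [Function.comp_apply]
  rw [hfilt]

-- ===== VERDICT (by name: the statement is the Claim_ definition above) =====
theorem cooc_spec : Claim_equal_cooc := by
  intro w t m _
  unfold Spec_cooc
  exact cooc_eq_cooc_alt w t m
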